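-- pv_equiv track=rewrite | github.com/satori5555/astrbot_plugin_pokemanpcr | main.py | _strip_alias_prefix
-- ===== SOURCE A (Python) =====
-- from typing import Iterable
--
-- def _strip_alias_prefix(text: str, aliases: Iterable[str]) -> str:
--     text = text.strip()
--     if text.startswith('/'):
--         text = text[1:].strip()
--     for alias in sorted(set(aliases), key=len, reverse=True):
--         if text == alias:
--             return ''
--         if text.startswith(alias + ' '):
--             return text[len(alias):].strip()
--     return text
-- ===== SOURCE B (Python) =====
-- def _strip_alias_prefix(text, aliases):
--     text = text.strip()
--     if text.startswith('/'):
--         text = text[1:].strip()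
--     best = None
--     for alias in set(aliases):
--         if (text == alias or text.startswith(alias + ' ')) and (best is None or len(alias) > len(best)):
--             best = alias
--     if best is None:
--         return text
--     if text == best:
--         return ''
--     return text[len(best):].strip()
-- ===== Notes on version B (the rewrite author's own statement) =====
-- stated objective: alternative
-- what changed: Replaces A's sort-by-length-descending plus early-return-on-first-match loop with a single unsorted scan over the alias set that tracks the longest matching alias, dispatching on the tracked best after the loop.
import Mathlib
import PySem

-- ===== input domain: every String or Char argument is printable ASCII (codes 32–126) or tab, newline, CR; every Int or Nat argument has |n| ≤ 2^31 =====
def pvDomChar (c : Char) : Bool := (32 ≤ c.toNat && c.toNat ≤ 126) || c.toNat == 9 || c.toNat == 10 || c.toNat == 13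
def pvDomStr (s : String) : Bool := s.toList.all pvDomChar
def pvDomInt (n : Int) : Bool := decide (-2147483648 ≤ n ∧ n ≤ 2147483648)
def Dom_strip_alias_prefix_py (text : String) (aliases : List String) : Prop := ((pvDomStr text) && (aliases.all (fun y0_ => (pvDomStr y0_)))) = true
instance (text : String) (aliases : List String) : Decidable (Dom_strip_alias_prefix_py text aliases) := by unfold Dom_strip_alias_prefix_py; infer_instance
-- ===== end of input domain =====

-- B replaces A's sort-then-first-match loop by one max-tracking scan of the alias set (objective: alternative, same result).

-- shared normalization (identical first three lines of both Pythons): strip, drop a leading '/', strip again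
def pvNorm (t : List Char) : List Char :=
  let t1 := PySem.Chars.strip t
  if PySem.Chars.startswith t1 ['/'] then PySem.Chars.strip (PySem.Chars.slice t1 (some 1) none) else t1

-- ===== PORT A =====
def pvLoopA (t : List Char) : List (List Char) → List Char
  | [] => t
  | a :: rest =>
    if t == a then []
    else if PySem.Chars.startswith t (a ++ [' ']) then
      PySem.Chars.strip (PySem.Chars.slice t (some ((a.length : Int))) none)
    else pvLoopA t rest

def strip_alias_prefix_py (text : String) (aliases : List String) : String :=
  let t := pvNorm text.toList
  String.ofList (pvLoopA t (PySem.List.sorted (PySem.Set.ofList (aliases.map String.toList)) (fun a => a.length) true))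

-- ===== PORT B =====
def pvStepB (t : List Char) (best : Option (List Char)) (a : List Char) : Option (List Char) :=
  if ((t == a || PySem.Chars.startswith t (a ++ [' '])) &&
      (match best with | none => true | some b => decide (b.length < a.length)))
  then some a else best

def strip_alias_prefix_py_alt (text : String) (aliases : List String) : String :=
  let t := pvNorm text.toList
  match (PySem.Set.ofList (aliases.map String.toList)).foldl (pvStepB t) none with
  | none => String.ofList t
  | some b =>
    if t == b then ""
    else String.ofList (PySem.Chars.strip (PySem.Chars.slice t (some ((b.length : Int))) none))

-- ===== PRECONDITION & SPEC =====
def Spec_strip_alias_prefix_py (text : String) (aliases : List String) (out : String) : Prop := out = strip_alias_prefix_py_alt text aliases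
instance (text : String) (aliases : List String) (out : String) : Decidable (Spec_strip_alias_prefix_py text aliases out) := by unfold Spec_strip_alias_prefix_py; infer_instance

-- ===== CLAIM (what is proved, stated in full; the proofs are below) =====
def Claim_equal_strip_alias_prefix_py : Prop := ∀ (text : String) (aliases : List String), Dom_strip_alias_prefix_py text aliases → Spec_strip_alias_prefix_py text aliases (strip_alias_prefix_py text aliases)

-- ===== LEMMAS AND PROOFS =====

-- "alias matches": text equals the alias, or alias + ' ' is a prefix of text
def pvM (t a : List Char) : Prop := t = a ∨ (a ++ [' ']) <+: t

-- the value both programs return once a matching alias x is chosen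
def pvOut (t x : List Char) : List Char :=
  PySem.Chars.strip (PySem.Chars.slice t (some ((x.length : Int))) none)

lemma pvM_iff (t a : List Char) :
    ((t == a || PySem.Chars.startswith t (a ++ [' '])) = true) ↔ pvM t a := by
  simp [pvM, PySem.Chars.startswith_iff]

-- two matching aliases of equal length are equal
lemma pvM_len_eq {t a b : List Char} (ha : pvM t a) (hb : pvM t b)
    (h : a.length = b.length) : a = b := by
  rcases ha with ha | ha <;> rcases hb with hb | hb
  · exact ha ▸ hb ▸ rfl
  · exfalso
    have h1 := hb.length_le
    have h2 : t.length = a.length := by rw [ha]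
    simp at h1
    omega
  · exfalso
    have h1 := ha.length_le
    have h2 : t.length = b.length := by rw [hb]
    simp at h1
    omega
  · have ha' : a <+: t := ((List.prefix_append a [' ']).trans ha)
    have hb' : b <+: t := ((List.prefix_append b [' ']).trans hb)
    rw [List.prefix_iff_eq_take] at ha' hb'
    rw [ha', hb', h]

lemma pvOut_self (t : List Char) : pvOut t t = [] := by
  unfold pvOut
  rw [PySem.Chars.slice_eq_listSlice, PySem.List.slice_from_natCast]
  simp only [List.drop_length]
  decide

lemma pvLoopA_none (t : List Char) :
    ∀ (l : List (List Char)), (∀ a ∈ l, ¬ pvM t a) → pvLoopA t l = t := by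
  intro l
  induction l with
  | nil => intro _; rfl
  | cons a rest ih =>
    intro h
    have hna : ¬ pvM t a := h a (by simp)
    have h1 : (t == a) = false := by
      rcases hb : (t == a) with _ | _
      · rfl
      · exact absurd (Or.inl (by simpa using hb)) hna
    have h2 : PySem.Chars.startswith t (a ++ [' ']) = false := by
      rcases hb : PySem.Chars.startswith t (a ++ [' ']) with _ | _
      · rfl
      · exact absurd (Or.inr ((PySem.Chars.startswith_iff t (a ++ [' '])).mp hb)) hna
    simp only [pvLoopA, h1, h2, Bool.false_eq_true, if_false]
    exact ih (fun x hx => h x (by simp [hx]))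

lemma pvLoopA_match (t : List Char) :
    ∀ (l : List (List Char)), l.Pairwise (fun a b => b.length ≤ a.length) →
    ∀ x, pvM t x → x ∈ l → (∀ a ∈ l, pvM t a → a.length ≤ x.length) →
    pvLoopA t l = pvOut t x := by
  intro l
  induction l with
  | nil => intro _ x _ hx; simp at hx
  | cons a rest ih =>
    intro hp x hMx hxmem hmax
    have hpa := (List.pairwise_cons.mp hp).1
    have hpr := (List.pairwise_cons.mp hp).2
    by_cases hMa : pvM t a
    · -- a matches, so a = x (both have maximal length among matches)
      have hax : a = x := by
        apply pvM_len_eq hMa hMx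
        have h1 : a.length ≤ x.length := hmax a (by simp) hMa
        rcases List.mem_cons.mp hxmem with h | h
        · rw [h]
        · have := hpa x h
          omega
      rcases hMa with hMa | hMa
      · have h1 : (t == a) = true := by simp [hMa]
        simp only [pvLoopA, h1, if_true]
        have hx : t = x := hax ▸ hMa
        rw [← hx, pvOut_self]
      · have h2 : PySem.Chars.startswith t (a ++ [' ']) = true :=
          (PySem.Chars.startswith_iff t (a ++ [' '])).mpr hMa
        have h1 : (t == a) = false := by
          rcases hb : (t == a) with _ | _
          · rfl
          · exfalso
            have ht : t = a := by simpa using hb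
            have h3 := hMa.length_le
            have h4 : t.length = a.length := by rw [ht]
            simp at h3
            omega
        simp only [pvLoopA, h1, h2, Bool.false_eq_true, if_false, if_true]
        rw [hax]
        rfl
    · have h1 : (t == a) = false := by
        rcases hb : (t == a) with _ | _
        · rfl
        · exact absurd (Or.inl (by simpa using hb)) hMa
      have h2 : PySem.Chars.startswith t (a ++ [' ']) = false := by
        rcases hb : PySem.Chars.startswith t (a ++ [' ']) with _ | _
        · rfl
        · exact absurd (Or.inr ((PySem.Chars.startswith_iff t (a ++ [' '])).mp hb)) hMa
      simp only [pvLoopA, h1, h2, Bool.false_eq_true, if_false]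
      have hxr : x ∈ rest := by
        rcases List.mem_cons.mp hxmem with h | h
        · exact absurd (h ▸ hMx) hMa
        · exact h
      exact ih hpr x hMx hxr (fun y hy hMy => hmax y (by simp [hy]) hMy)

lemma pvFoldB_spec (t : List Char) :
    ∀ (l : List (List Char)) (b0 : Option (List Char)),
    (∀ x, b0 = some x → pvM t x) →
    ((∀ x, l.foldl (pvStepB t) b0 = some x → pvM t x ∧ (x ∈ l ∨ b0 = some x))
     ∧ (∀ a ∈ l, pvM t a → ∃ x, l.foldl (pvStepB t) b0 = some x ∧ a.length ≤ x.length)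
     ∧ (∀ x, b0 = some x → ∃ y, l.foldl (pvStepB t) b0 = some y ∧ x.length ≤ y.length)) := by
  intro l
  induction l with
  | nil =>
    intro b0 hb0
    refine ⟨fun x hx => ⟨hb0 x hx, Or.inr hx⟩, by simp, fun x hx => ⟨x, hx, le_refl _⟩⟩
  | cons a rest ih =>
    intro b0 hb0
    have hfold : (a :: rest).foldl (pvStepB t) b0 = rest.foldl (pvStepB t) (pvStepB t b0 a) := rfl
    by_cases hM : (t == a || PySem.Chars.startswith t (a ++ [' '])) = true
    · rcases b0 with _ | b
      · -- no best yet: the step takes a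
        have hstep : pvStepB t none a = some a := by simp [pvStepB, hM]
        obtain ⟨c1, c2, c3⟩ := ih (some a)
          (fun x hx => by cases hx; exact (pvM_iff t a).mp hM)
        rw [hfold, hstep]
        refine ⟨fun x hx => ?_, fun y hy hMy => ?_, fun x hx => by simp at hx⟩
        · obtain ⟨hm, hw⟩ := c1 x hx
          refine ⟨hm, Or.inl ?_⟩
          rcases hw with h | h
          · simp [h]
          · cases h; simp
        · rcases List.mem_cons.mp hy with h | h
          · subst h; exact c3 y rfl
          · exact c2 y h hMy
      · by_cases hlt : b.length < a.length
        · -- strictly longer match: the step takes a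
          have hstep : pvStepB t (some b) a = some a := by simp [pvStepB, hM, hlt]
          obtain ⟨c1, c2, c3⟩ := ih (some a)
            (fun x hx => by cases hx; exact (pvM_iff t a).mp hM)
          rw [hfold, hstep]
          refine ⟨fun x hx => ?_, fun y hy hMy => ?_, fun x hx => ?_⟩
          · obtain ⟨hm, hw⟩ := c1 x hx
            refine ⟨hm, Or.inl ?_⟩
            rcases hw with h | h
            · simp [h]
            · cases h; simp
          · rcases List.mem_cons.mp hy with h | h
            · subst h; exact c3 y rfl
            · exact c2 y h hMy
          · cases hx
            obtain ⟨y, hy, hlen⟩ := c3 a rfl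
            exact ⟨y, hy, by omega⟩
        · -- current best is at least as long: keep it
          have hstep : pvStepB t (some b) a = some b := by simp [pvStepB, hlt]
          obtain ⟨c1, c2, c3⟩ := ih (some b) hb0
          rw [hfold, hstep]
          refine ⟨fun x hx => ?_, fun y hy hMy => ?_, c3⟩
          · obtain ⟨hm, hw⟩ := c1 x hx
            refine ⟨hm, ?_⟩
            rcases hw with h | h
            · exact Or.inl (List.mem_cons_of_mem a h)
            · exact Or.inr h
          · rcases List.mem_cons.mp hy with h | h
            · subst h
              obtain ⟨y', hy', hlen⟩ := c3 b rfl
              exact ⟨y', hy', by omega⟩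
            · exact c2 y h hMy
    · -- a does not match: the step keeps the accumulator
      have hstep : pvStepB t b0 a = b0 := by simp [pvStepB, hM]
      obtain ⟨c1, c2, c3⟩ := ih b0 hb0
      rw [hfold, hstep]
      refine ⟨fun x hx => ?_, fun y hy hMy => ?_, c3⟩
      · obtain ⟨hm, hw⟩ := c1 x hx
        refine ⟨hm, ?_⟩
        rcases hw with h | h
        · exact Or.inl (List.mem_cons_of_mem a h)
        · exact Or.inr h
      · rcases List.mem_cons.mp hy with h | h
        · subst h; exact absurd ((pvM_iff t y).mpr hMy) hM
        · exact c2 y h hMy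

-- ===== VERDICT (by name: the statement is the Claim_ definition above) =====
theorem strip_alias_prefix_py_spec : Claim_equal_strip_alias_prefix_py := by
  intro text aliases _
  unfold Spec_strip_alias_prefix_py
  show strip_alias_prefix_py text aliases = strip_alias_prefix_py_alt text aliases
  simp only [strip_alias_prefix_py, strip_alias_prefix_py_alt]
  generalize pvNorm text.toList = t
  generalize PySem.Set.ofList (aliases.map String.toList) = S
  obtain ⟨c1, c2, c3⟩ := pvFoldB_spec t S none (by simp)
  rcases hfold : S.foldl (pvStepB t) none with _ | x
  · -- no alias matches
    have hnone : ∀ a ∈ S, ¬ pvM t a := by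
      intro a ha hMa
      obtain ⟨x, hx, _⟩ := c2 a ha hMa
      rw [hfold] at hx
      simp at hx
    have hA : pvLoopA t (PySem.List.sorted S (fun a => a.length) true) = t := by
      apply pvLoopA_none
      intro a ha
      exact hnone a ((PySem.List.mem_sorted S (fun a => a.length) true a).mp ha)
    rw [hA]
  · obtain ⟨hMx, hw⟩ := c1 x hfold
    have hxS : x ∈ S := by
      rcases hw with h | h
      · exact h
      · simp at h
    have hmax : ∀ a ∈ S, pvM t a → a.length ≤ x.length := by
      intro a ha hMa
      obtain ⟨y, hy, hlen⟩ := c2 a ha hMa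
      rw [hfold] at hy
      cases hy
      exact hlen
    have hA : pvLoopA t (PySem.List.sorted S (fun a => a.length) true) = pvOut t x := by
      apply pvLoopA_match t _ (PySem.List.sorted_pairwise_rev S (fun a => a.length)) x hMx
      · exact (PySem.List.mem_sorted S (fun a => a.length) true x).mpr hxS
      · intro a ha hMa
        exact hmax a ((PySem.List.mem_sorted S (fun a => a.length) true a).mp ha) hMa
    rw [hA]
    show String.ofList (pvOut t x) =
      if (t == x) = true then ""
      else String.ofList (PySem.Chars.strip (PySem.Chars.slice t (some ((x.length : Int))) none))
    by_cases heq : t = x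
    · rw [if_pos (by simp [heq]), ← heq, pvOut_self]
    · rw [if_neg (by simp [heq])]
      rfl
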